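-- pv_equiv track=rewrite | github.com/E3SM-Project/e3sm-comms | e3sm_comms/term_reviewer/main.py | build_year_summary
-- ===== SOURCE A (Python) =====
-- from typing import Callable, DefaultDict, Dict, List, Optional, Tuple
--
-- def build_year_summary(
--     grouped_entries: Dict[str, List[Tuple[int, str]]],
-- ) -> Dict[str, Dict[str, int]]:
--     summary: Dict[str, Dict[str, int]] = {}
--
--     for year, entries in grouped_entries.items():
--         counts = {
--             "total": len(entries),
--             "1": 0,
--             "2": 0,
--             "3": 0,
--             "4": 0,
--             "5+": 0,
--         }
--
--         for total_terms, _ in entries: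
--             if total_terms == 1:
--                 counts["1"] += 1
--             elif total_terms == 2:
--                 counts["2"] += 1
--             elif total_terms == 3:
--                 counts["3"] += 1
--             elif total_terms == 4:
--                 counts["4"] += 1
--             elif total_terms >= 5:
--                 counts["5+"] += 1
--
--         summary[year] = counts
--
--     return summary
-- ===== SOURCE B (Python) =====
-- def build_year_summary(grouped_entries):
--     def count_if(entries, pred):
--         return sum(1 for t, _ in entries if pred(t))
--
--     return {
--         year: {
--             "total": len(entries),
--             "1": count_if(entries, lambda t: t == 1),
--             "2": count_if(entries, lambda t: t == 2),
--             "3": count_if(entries, lambda t: t == 3),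
--             "4": count_if(entries, lambda t: t == 4),
--             "5+": count_if(entries, lambda t: t >= 5),
--         }
--         for year, entries in grouped_entries.items()
--     }
-- ===== Notes on version B (the rewrite author's own statement) =====
-- stated objective: simpler
-- what changed: Replaces the mutable counts dict and the branchy increment loop with a pure dict comprehension that projects each bucket by a direct per-bucket count (count_if), with no mutation.
import Mathlib
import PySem

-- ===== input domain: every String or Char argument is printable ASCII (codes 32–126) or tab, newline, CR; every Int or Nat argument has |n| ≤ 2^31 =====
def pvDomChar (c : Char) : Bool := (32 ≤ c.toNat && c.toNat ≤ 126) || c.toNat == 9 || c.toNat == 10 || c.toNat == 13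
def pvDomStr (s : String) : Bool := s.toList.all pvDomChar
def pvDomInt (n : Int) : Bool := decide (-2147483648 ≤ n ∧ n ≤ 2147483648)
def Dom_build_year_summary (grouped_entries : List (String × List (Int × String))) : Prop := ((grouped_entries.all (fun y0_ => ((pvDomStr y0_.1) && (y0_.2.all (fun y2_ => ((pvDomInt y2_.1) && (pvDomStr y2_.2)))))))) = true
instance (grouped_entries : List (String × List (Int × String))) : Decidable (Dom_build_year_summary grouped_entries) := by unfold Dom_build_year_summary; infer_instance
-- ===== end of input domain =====

-- B replaces A's mutable counts dict and branchy increment loop by a pure dict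
-- comprehension projecting each bucket with a direct per-bucket count (simpler, no mutation).

-- ===== PORT A =====
-- inner loop of A: counts["k"] += 1 on the matching bucket (no-op for total_terms < 1)
def pvCountsLoop (entries : List (Int × String)) (counts : PySem.Dict String Int) : PySem.Dict String Int :=
  entries.foldl (fun counts p =>
    if p.1 == 1 then counts.modify "1" 0 (· + 1)
    else if p.1 == 2 then counts.modify "2" 0 (· + 1)
    else if p.1 == 3 then counts.modify "3" 0 (· + 1)
    else if p.1 == 4 then counts.modify "4" 0 (· + 1)
    else if p.1 ≥ 5 then counts.modify "5+" 0 (· + 1)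
    else counts) counts

def build_year_summary (grouped_entries : List (String × List (Int × String))) : List (String × List (String × Int)) :=
  (grouped_entries.foldl (fun summary p =>
      summary.insert p.1
        ((pvCountsLoop p.2
          (PySem.Dict.ofList [("total", (p.2.length : Int)), ("1", 0), ("2", 0), ("3", 0), ("4", 0), ("5+", 0)])).items))
    PySem.Dict.empty).items

-- ===== PORT B =====
-- count_if(entries, pred) = sum(1 for t, _ in entries if pred(t))
def pvCountIf (entries : List (Int × String)) (pred : Int → Bool) : Int :=
  entries.foldl (fun a p => if pred p.1 then a + 1 else a) 0

def build_year_summary_alt (grouped_entries : List (String × List (Int × String))) : List (String × List (String × Int)) :=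
  (PySem.Dict.ofList (grouped_entries.map (fun p =>
    (p.1,
      [("total", (p.2.length : Int)),
       ("1", pvCountIf p.2 (fun t => t == 1)),
       ("2", pvCountIf p.2 (fun t => t == 2)),
       ("3", pvCountIf p.2 (fun t => t == 3)),
       ("4", pvCountIf p.2 (fun t => t == 4)),
       ("5+", pvCountIf p.2 (fun t => t ≥ 5))])))).items

-- ===== PRECONDITION & SPEC =====
def Spec_build_year_summary (grouped_entries : List (String × List (Int × String))) (out : List (String × List (String × Int))) : Prop := out = build_year_summary_alt grouped_entries
instance (grouped_entries : List (String × List (Int × String))) (out : List (String × List (String × Int))) : Decidable (Spec_build_year_summary grouped_entries out) := by unfold Spec_build_year_summary; infer_instance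

-- ===== CLAIM (what is proved, stated in full; the proofs are below) =====
def Claim_equal_build_year_summary : Prop := ∀ (grouped_entries : List (String × List (Int × String))), Dom_build_year_summary grouped_entries → Spec_build_year_summary grouped_entries (build_year_summary grouped_entries)

-- ===== LEMMAS AND PROOFS =====

lemma pvFoldl_shift (pred : Int → Bool) (l : List (Int × String)) (x : Int) :
    l.foldl (fun a p => if pred p.1 then a + 1 else a) x =
    x + l.foldl (fun a p => if pred p.1 then a + 1 else a) 0 := by
  induction l generalizing x with
  | nil => simp
  | cons p rest ih =>
    simp only [List.foldl_cons]
    rw [ih, ih (if pred p.1 then (0:Int) + 1 else 0)]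
    split <;> omega

lemma pvCountIf_cons (p : Int × String) (rest : List (Int × String)) (pred : Int → Bool) :
    pvCountIf (p :: rest) pred = (if pred p.1 then 1 else 0) + pvCountIf rest pred := by
  simp only [pvCountIf, List.foldl_cons]
  rw [pvFoldl_shift]
  split <;> omega

lemma pvOfList6 (n a b c d e : Int) :
    PySem.Dict.ofList [("total", n), ("1", a), ("2", b), ("3", c), ("4", d), ("5+", e)] =
    PySem.Dict.mk [("total", n), ("1", a), ("2", b), ("3", c), ("4", d), ("5+", e)] := by
  simp [PySem.Dict.ofList, PySem.Dict.update, PySem.Dict.insert, PySem.Dict.contains,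
    PySem.Dict.empty]


lemma pvModify1 (n a b c d e : Int) :
    (PySem.Dict.mk [("total", n), ("1", a), ("2", b), ("3", c), ("4", d), ("5+", e)]).modify "1" 0 (· + 1) =
    PySem.Dict.mk [("total", n), ("1", a + 1), ("2", b), ("3", c), ("4", d), ("5+", e)] := by
  simp [PySem.Dict.modify, PySem.Dict.insert, PySem.Dict.contains, PySem.Dict.getD, PySem.Dict.get?]

lemma pvModify2 (n a b c d e : Int) :
    (PySem.Dict.mk [("total", n), ("1", a), ("2", b), ("3", c), ("4", d), ("5+", e)]).modify "2" 0 (· + 1) =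
    PySem.Dict.mk [("total", n), ("1", a), ("2", b + 1), ("3", c), ("4", d), ("5+", e)] := by
  simp [PySem.Dict.modify, PySem.Dict.insert, PySem.Dict.contains, PySem.Dict.getD, PySem.Dict.get?]

lemma pvModify3 (n a b c d e : Int) :
    (PySem.Dict.mk [("total", n), ("1", a), ("2", b), ("3", c), ("4", d), ("5+", e)]).modify "3" 0 (· + 1) =
    PySem.Dict.mk [("total", n), ("1", a), ("2", b), ("3", c + 1), ("4", d), ("5+", e)] := by
  simp [PySem.Dict.modify, PySem.Dict.insert, PySem.Dict.contains, PySem.Dict.getD, PySem.Dict.get?]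

lemma pvModify4 (n a b c d e : Int) :
    (PySem.Dict.mk [("total", n), ("1", a), ("2", b), ("3", c), ("4", d), ("5+", e)]).modify "4" 0 (· + 1) =
    PySem.Dict.mk [("total", n), ("1", a), ("2", b), ("3", c), ("4", d + 1), ("5+", e)] := by
  simp [PySem.Dict.modify, PySem.Dict.insert, PySem.Dict.contains, PySem.Dict.getD, PySem.Dict.get?]

lemma pvModify5 (n a b c d e : Int) :
    (PySem.Dict.mk [("total", n), ("1", a), ("2", b), ("3", c), ("4", d), ("5+", e)]).modify "5+" 0 (· + 1) =
    PySem.Dict.mk [("total", n), ("1", a), ("2", b), ("3", c), ("4", d), ("5+", e + 1)] := by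
  simp [PySem.Dict.modify, PySem.Dict.insert, PySem.Dict.contains, PySem.Dict.getD, PySem.Dict.get?]

lemma pvCountsLoop_eq (entries : List (Int × String)) (n a b c d e : Int) :
    pvCountsLoop entries
      (PySem.Dict.mk [("total", n), ("1", a), ("2", b), ("3", c), ("4", d), ("5+", e)]) =
    PySem.Dict.mk [("total", n),
      ("1", a + pvCountIf entries (fun t => t == 1)),
      ("2", b + pvCountIf entries (fun t => t == 2)),
      ("3", c + pvCountIf entries (fun t => t == 3)),
      ("4", d + pvCountIf entries (fun t => t == 4)),
      ("5+", e + pvCountIf entries (fun t => t ≥ 5))] := by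
  induction entries generalizing a b c d e with
  | nil => simp [pvCountsLoop, pvCountIf]
  | cons p rest ih =>
    simp only [pvCountsLoop, List.foldl_cons] at ih ⊢
    simp only [pvCountIf_cons]
    by_cases h1 : p.1 = 1
    · rw [if_pos (by simp [h1] : ((p.1 == 1) = true)), pvModify1, ih]
      simp [h1, add_assoc]
    · rw [if_neg (by simp [h1] : ¬ ((p.1 == 1) = true))]
      by_cases h2 : p.1 = 2
      · rw [if_pos (by simp [h2] : ((p.1 == 2) = true)), pvModify2, ih]
        simp [h2, add_assoc]
      · rw [if_neg (by simp [h2] : ¬ ((p.1 == 2) = true))]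
        by_cases h3 : p.1 = 3
        · rw [if_pos (by simp [h3] : ((p.1 == 3) = true)), pvModify3, ih]
          simp [h3, add_assoc]
        · rw [if_neg (by simp [h3] : ¬ ((p.1 == 3) = true))]
          by_cases h4 : p.1 = 4
          · rw [if_pos (by simp [h4] : ((p.1 == 4) = true)), pvModify4, ih]
            simp [h4, add_assoc]
          · rw [if_neg (by simp [h4] : ¬ ((p.1 == 4) = true))]
            by_cases h5 : p.1 ≥ 5
            · rw [if_pos h5, pvModify5, ih]
              simp [h1, h2, h3, h4, h5, add_assoc]
            · rw [if_neg h5, ih]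
              simp [h1, h2, h3, h4, h5]

lemma pvInner_eq (e : List (Int × String)) :
    (pvCountsLoop e
      (List.foldl (fun acc p => acc.insert p.1 p.2) PySem.Dict.empty
        [("total", (e.length : Int)), ("1", 0), ("2", 0), ("3", 0), ("4", 0), ("5+", 0)])).items =
    [("total", (e.length : Int)),
     ("1", pvCountIf e (fun t => t == 1)),
     ("2", pvCountIf e (fun t => t == 2)),
     ("3", pvCountIf e (fun t => t == 3)),
     ("4", pvCountIf e (fun t => t == 4)),
     ("5+", pvCountIf e (fun t => t ≥ 5))] := by
  rw [show List.foldl (fun (acc : PySem.Dict String Int) p => acc.insert p.1 p.2) PySem.Dict.empty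
        [("total", (e.length : Int)), ("1", 0), ("2", 0), ("3", 0), ("4", 0), ("5+", 0)] =
      PySem.Dict.ofList [("total", (e.length : Int)), ("1", 0), ("2", 0), ("3", 0), ("4", 0), ("5+", 0)] from rfl,
    pvOfList6, pvCountsLoop_eq]
  simp

-- ===== VERDICT (by name: the statement is the Claim_ definition above) =====
theorem build_year_summary_spec : Claim_equal_build_year_summary := by
  intro ge _
  unfold Spec_build_year_summary build_year_summary build_year_summary_alt
  simp only [PySem.Dict.ofList, PySem.Dict.update, List.foldl_map]
  congr 2
  funext d p
  rw [pvInner_eq]
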